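-- pv_equiv track=rewrite | github.com/hong0002/Baekjoon | 기타/9966.py | is_rotatable
-- ===== SOURCE A (Python) =====
-- rotate = {
--     '0': '0',
--     '1': '1',
--     '8': '8',
--     '6': '9',
--     '9': '6'
-- }
--
-- def is_rotatable(num):
--     s = str(num)
--     left = 0
--     right = len(s) - 1
--
--     while left <= right:
--         if s[left] not in rotate:
--             return False
--         if rotate[s[left]] != s[right]:
--             return False
--         left += 1
--         right -= 1
--
--     return True
-- ===== SOURCE B (Python) =====
-- rotate = {
--     '0': '0',
--     '1': '1',
--     '8': '8',
--     '6': '9',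
--     '9': '6'
-- }
--
-- def is_rotatable(num):
--     s = str(num)
--     if any(c not in rotate for c in s):
--         return False
--     rotated = ''.join(rotate[c] for c in reversed(s))
--     return rotated == s
-- ===== Notes on version B (the rewrite author's own statement) =====
-- stated objective: simpler
-- what changed: Replaces the index-based converging two-pointer loop with a membership guard followed by materializing the 180-degree-rotated string (map over the reversal) and a single whole-string comparison; correctness of matching only half the pairs in A is recovered from the involution of the rotate map.
import Mathlib
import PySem

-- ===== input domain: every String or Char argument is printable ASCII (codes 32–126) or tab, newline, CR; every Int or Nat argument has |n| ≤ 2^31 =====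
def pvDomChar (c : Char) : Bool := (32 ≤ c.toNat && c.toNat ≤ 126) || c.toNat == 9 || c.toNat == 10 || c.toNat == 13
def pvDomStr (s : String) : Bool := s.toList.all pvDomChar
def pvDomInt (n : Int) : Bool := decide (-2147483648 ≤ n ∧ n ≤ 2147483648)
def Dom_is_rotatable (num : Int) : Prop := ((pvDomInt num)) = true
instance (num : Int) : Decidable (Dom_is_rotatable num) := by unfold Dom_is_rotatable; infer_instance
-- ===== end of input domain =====

-- B replaces A's converging two-pointer index loop with a membership guard plus
-- build-the-rotated-string-and-compare (map over the reversal); simpler decomposition, same cost.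


-- ===== PORT A =====
-- the dict `rotate`: membership test = isSome, lookup = getD
def rot? (c : Char) : Option Char :=
  if c = '0' then some '0'
  else if c = '1' then some '1'
  else if c = '8' then some '8'
  else if c = '6' then some '9'
  else if c = '9' then some '6'
  else none

-- the while-loop of A over indices left/right into s
def aLoop (s : List Char) (left right : Int) : Bool :=
  if _h : left ≤ right then
    match PySem.List.pyGet? s left with
    | none => false      -- unreachable: when A calls it the indices are always in range
    | some cl =>
      match rot? cl with
      | none => false
      | some r =>
        match PySem.List.pyGet? s right with
        | none => false  -- unreachable likewise
        | some cr => if r ≠ cr then false else aLoop s (left + 1) (right - 1)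
  else true
termination_by (right + 1 - left).toNat
decreasing_by simp_wf; omega

def is_rotatable (num : Int) : Bool :=
  let s := PySem.Int.toChars num
  aLoop s 0 ((s.length : Int) - 1)

-- ===== PORT B =====
-- guard: any(c not in rotate for c in s) → False; else build rotated and compare.
-- (rot? c).getD c ports rotate[c]; under the guard every c is a key, so the default is never used.
def is_rotatable_alt (num : Int) : Bool :=
  let s := PySem.Int.toChars num
  if s.all (fun c => (rot? c).isSome) then
    decide (s.reverse.map (fun c => (rot? c).getD c) = s)
  else false

-- ===== PRECONDITION & SPEC =====
def Spec_is_rotatable (num : Int) (out : Bool) : Prop := out = is_rotatable_alt num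
instance (num : Int) (out : Bool) : Decidable (Spec_is_rotatable num out) := by unfold Spec_is_rotatable; infer_instance

-- ===== CLAIM (what is proved, stated in full; the proofs are below) =====
def Claim_equal_is_rotatable : Prop := ∀ (num : Int), Dom_is_rotatable num → Spec_is_rotatable num (is_rotatable num)

-- ===== LEMMAS AND PROOFS =====

-- one-step unfolding of A's loop
theorem aLoop_eq (s : List Char) (left right : Int) :
    aLoop s left right =
      if left ≤ right then
        (match PySem.List.pyGet? s left with
         | none => false
         | some cl =>
           match rot? cl with
           | none => false
           | some r =>
             match PySem.List.pyGet? s right with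
             | none => false
             | some cr => if r ≠ cr then false else aLoop s (left + 1) (right - 1))
      else true := by
  rw [aLoop]
  rfl

-- rotate is an involution on its keys
theorem rot_invol {c d : Char} (h : rot? c = some d) : rot? d = some c := by
  unfold rot? at h ⊢
  split_ifs at h <;> simp_all <;> subst h <;> decide

-- shifting the index window into c :: (m ++ [d]) by one equals running on m
theorem aLoop_shift (m : List Char) (c d : Char) :
    ∀ (n : Nat) (left right : Int), (right + 1 - left).toNat = n →
      0 ≤ left → right < (m.length : Int) →
      aLoop (c :: (m ++ [d])) (left + 1) (right + 1) = aLoop m left right := by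
  intro n
  induction n using Nat.strong_induction_on with
  | _ n ih =>
    intro left right hn hl hr
    by_cases h : left ≤ right
    · have hget : PySem.List.pyGet? (c :: (m ++ [d])) (left + 1) = PySem.List.pyGet? m left := by
        rw [PySem.List.pyGet?_of_nonneg (c :: (m ++ [d])) (by omega),
          PySem.List.pyGet?_of_nonneg m hl]
        have e : (left + 1).toNat = left.toNat + 1 := by omega
        rw [e, List.getElem?_cons_succ]
        exact List.getElem?_append_left (by omega)
      have hgetR : PySem.List.pyGet? (c :: (m ++ [d])) (right + 1) = PySem.List.pyGet? m right := by
        rw [PySem.List.pyGet?_of_nonneg (c :: (m ++ [d])) (by omega),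
          PySem.List.pyGet?_of_nonneg m (by omega)]
        have e : (right + 1).toNat = right.toNat + 1 := by omega
        rw [e, List.getElem?_cons_succ]
        exact List.getElem?_append_left (by omega)
      conv_lhs => rw [aLoop_eq]
      conv_rhs => rw [aLoop_eq]
      rw [if_pos (show left + 1 ≤ right + 1 by omega), if_pos h, hget, hgetR]
      cases PySem.List.pyGet? m left with
      | none => rfl
      | some cl =>
        dsimp only []
        cases rot? cl with
        | none => rfl
        | some r =>
          dsimp only []
          cases PySem.List.pyGet? m right with
          | none => rfl
          | some cr =>
            dsimp only []
            by_cases hr' : r = cr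
            · subst hr'
              rw [if_neg (by simp)]
              rw [if_neg (by simp)]
              have hrec := ih (right - left - 1).toNat (by omega) (left + 1) (right - 1)
                (by omega) (by omega) (by omega)
              have e2 : right - 1 + 1 = right + 1 - 1 := by omega
              rw [e2] at hrec
              exact hrec
            · rw [if_pos hr']
              rw [if_pos hr']
    · conv_lhs => rw [aLoop_eq]
      conv_rhs => rw [aLoop_eq]
      rw [if_neg (show ¬ left + 1 ≤ right + 1 by omega), if_neg h]

-- last element of x :: (l ++ [y])
theorem lastHelper {T : Type} (x y : T) (l : List T) : (x :: (l ++ [y])).getLast? = some y := by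
  rw [← List.cons_append]
  exact List.getLast?_concat

-- main characterisation: A's loop from the ends equals B's guard-and-compare
theorem main_aux : ∀ (n : Nat) (s : List Char), s.length = n →
    aLoop s 0 ((s.length : Int) - 1) =
      (s.all (fun c => (rot? c).isSome) &&
        decide (s.reverse.map (fun c => (rot? c).getD c) = s)) := by
  intro n
  induction n using Nat.strong_induction_on with
  | _ n ih =>
  intro s hn
  match s with
  | [] => simp [aLoop_eq]
  | [c] =>
    have h0 : (([c].length : Int) - 1) = 0 := by simp
    rw [h0, aLoop_eq, if_pos le_rfl]
    rw [PySem.List.pyGet?_zero_cons]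
    dsimp only []
    cases hrc : rot? c with
    | none => simp [hrc]
    | some r =>
      dsimp only []
      by_cases h : r = c
      · subst h
        rw [if_neg (by simp)]
        rw [aLoop_eq, if_neg (by omega)]
        simp [hrc]
      · rw [if_pos (by simpa using h)]
        simp [hrc, h]
  | c :: t' :: ts =>
    have htne : (t' :: ts : List Char) ≠ [] := by simp
    obtain ⟨m, d, hmd⟩ : ∃ m d, (t' :: ts : List Char) = m ++ [d] :=
      ⟨(t' :: ts).dropLast, (t' :: ts).getLast htne,
        (List.dropLast_append_getLast htne).symm⟩
    rw [hmd]
    have hlen : ((c :: (m ++ [d])).length : Int) - 1 = ((m.length : Int) + 1) := by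
      simp
    rw [hlen, aLoop_eq, if_pos (by omega)]
    have hgetL : PySem.List.pyGet? (c :: (m ++ [d])) ((m.length : Int) + 1) = some d := by
      rw [PySem.List.pyGet?_of_nonneg (c :: (m ++ [d])) (by omega)]
      have e : ((m.length : Int) + 1).toNat = m.length + 1 := by omega
      rw [e, List.getElem?_cons_succ]
      simp
    rw [PySem.List.pyGet?_zero_cons]
    dsimp only []
    cases hrc : rot? c with
    | none => simp [hrc]
    | some r =>
      dsimp only []
      rw [hgetL]
      dsimp only []
      by_cases hrd : r = d
      · subst hrd
        rw [if_neg (by simp)]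
        have hshift := aLoop_shift m c r (((m.length : Int) - 1) + 1 - 0).toNat 0
          ((m.length : Int) - 1) rfl le_rfl (by omega)
        have e2 : ((m.length : Int) - 1) + 1 = (m.length : Int) := by omega
        rw [e2] at hshift
        have e3 : (m.length : Int) + 1 - 1 = (m.length : Int) := by omega
        rw [e3, hshift]
        have ihm := ih m.length (by have hm2 := congrArg List.length hmd; simp at hm2 hn; omega) m rfl
        rw [ihm]
        have hrdkey : rot? r = some c := rot_invol hrc
        simp only [List.all_cons, List.all_append, List.all_nil, hrc, hrdkey,
          Option.isSome_some, Bool.true_and, Bool.and_true]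
        have hrev : (c :: (m ++ [r])).reverse = r :: (m.reverse ++ [c]) := by simp
        rw [hrev]
        simp only [List.map_cons, List.map_append, List.map_nil, hrc, hrdkey,
          Option.getD_some]
        have hiff : (c :: ((m.reverse.map (fun c => (rot? c).getD c)) ++ [r])
            = c :: (m ++ [r])) ↔ (m.reverse.map (fun c => (rot? c).getD c) = m) := by
          constructor
          · intro h
            simp only [List.cons.injEq, true_and] at h
            exact List.append_inj_left h (by simp)
          · intro h
            rw [h]
        rw [decide_eq_decide.mpr hiff]
      · rw [if_pos (by simpa using hrd)]
        symm
        rw [Bool.and_eq_false_iff]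
        right
        rw [decide_eq_false_iff_not]
        intro heq
        have hrevc : (c :: (m ++ [d])).reverse = d :: (m.reverse ++ [c]) := by simp
        rw [hrevc] at heq
        simp only [List.map_cons, List.map_append, List.map_nil] at heq
        have h1 := congrArg List.getLast? heq
        rw [lastHelper, lastHelper] at h1
        simp only [hrc, Option.getD_some, Option.some.injEq] at h1
        exact hrd h1

-- ===== VERDICT (by name: the statement is the Claim_ definition above) =====
theorem is_rotatable_spec : Claim_equal_is_rotatable := by
  intro num _
  unfold Spec_is_rotatable is_rotatable is_rotatable_alt
  rw [main_aux (PySem.Int.toChars num).length _ rfl]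
  by_cases h : (PySem.Int.toChars num).all (fun c => (rot? c).isSome)
  · simp [h]
  · simp [h]
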